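-- pv_equiv track=rewrite | github.com/calmeidabr/KAN | mapa_cabalistico5.py | calcular_ciclos_vida
-- ===== SOURCE A (Python) =====
-- def reduce_number(n):
--     while n > 9 and n not in (11, 22, 33):
--         n = sum(int(i) for i in str(n))
--     return n
--
-- def calcular_ciclos_vida(dia, mes, ano, destino):
--     ciclo1_num = mes
--     while ciclo1_num > 9:
--         ciclo1_num = sum(int(d) for d in str(ciclo1_num))
--
--     ciclo1_ano_inicio = ano
--     ciclo1_periodo_anos = 37 - destino
--     ciclo1_ano_fim = ciclo1_ano_inicio + ciclo1_periodo_anos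
--
--     ciclo2_num = dia
--     while ciclo2_num > 9:
--         ciclo2_num = sum(int(d) for d in str(ciclo2_num))
--
--     ciclo2_ano_inicio = ciclo1_ano_fim
--     ciclo2_ano_fim = ciclo2_ano_inicio + 27
--
--     ano_reduzido = reduce_number(ano)
--     if ano_reduzido in [11, 22]:
--         ciclo3_num = ano_reduzido
--     else:
--         ciclo3_num = ano_reduzido
--     ciclo3_ano_inicio = ciclo2_ano_fim
--
--     return {
--         'ciclo1': {'numero': ciclo1_num, 'inicio': ciclo1_ano_inicio, 'fim': ciclo1_ano_fim},
--         'ciclo2': {'numero': ciclo2_num, 'inicio': ciclo2_ano_inicio, 'fim': ciclo2_ano_fim},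
--         'ciclo3': {'numero': ciclo3_num, 'inicio': ciclo3_ano_inicio, 'fim': None}
--     }
-- ===== SOURCE B (Python) =====
-- def calcular_ciclos_vida(dia, mes, ano, destino):
--     def raiz_digital(n):
--         # digital root closed form, equal to repeated digit-summing for n > 9
--         return n if n <= 9 else 1 + (n - 1) % 9
--
--     def reduzir(n):
--         # keeps master numbers 11/22/33, so no closed form applies here
--         if n <= 9 or n in (11, 22, 33):
--             return n
--         return reduzir(sum(int(d) for d in str(n)))
--
--     ciclo1_fim = ano + 37 - destino
--     ciclo2_fim = ciclo1_fim + 27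
--     return {
--         'ciclo1': {'numero': raiz_digital(mes), 'inicio': ano, 'fim': ciclo1_fim},
--         'ciclo2': {'numero': raiz_digital(dia), 'inicio': ciclo1_fim, 'fim': ciclo2_fim},
--         'ciclo3': {'numero': reduzir(ano), 'inicio': ciclo2_fim, 'fim': None},
--     }
-- ===== Notes on version B (the rewrite author's own statement) =====
-- stated objective: idiomatic
-- what changed: The two inline while-loops that repeatedly digit-sum mes and dia are replaced by the digital-root closed form 1+(n-1)%9 (guarded by n<=9), reduce_number becomes a recursive helper (kept, since it preserves master numbers 11/22/33), and the redundant ciclo3 if/else and intermediate variables are dropped.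
import Mathlib
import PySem

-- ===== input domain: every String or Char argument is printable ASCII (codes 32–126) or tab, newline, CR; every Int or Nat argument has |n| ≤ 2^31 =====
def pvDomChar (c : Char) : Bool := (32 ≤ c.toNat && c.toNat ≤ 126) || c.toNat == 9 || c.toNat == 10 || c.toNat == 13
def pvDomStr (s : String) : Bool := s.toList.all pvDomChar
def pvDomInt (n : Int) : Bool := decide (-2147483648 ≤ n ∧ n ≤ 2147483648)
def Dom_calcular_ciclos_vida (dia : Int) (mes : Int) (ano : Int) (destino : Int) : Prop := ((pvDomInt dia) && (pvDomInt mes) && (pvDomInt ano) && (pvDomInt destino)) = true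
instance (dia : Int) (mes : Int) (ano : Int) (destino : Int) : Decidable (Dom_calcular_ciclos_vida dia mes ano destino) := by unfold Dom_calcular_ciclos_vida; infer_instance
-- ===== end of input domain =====

-- B replaces the digit-sum while-loops for ciclo1/ciclo2 by the digital-root closed form
-- 1+(n-1)%9 (guarded by n<=9) and makes reduce_number a recursive helper; same return value.

-- ===== PORT A =====
-- int(d) for a single digit character d (exact: every char of str(n) for n ≥ 0 is a decimal digit,
-- and the digit-sum is only reached with n > 9 in both programs)
def pvCharVal (c : Char) : Int := (c.toNat : Int) - 48

-- port of sum(int(d) for d in str(n))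
def pvDigitSum (n : Int) : Int := ((PySem.Int.toChars n).map pvCharVal).sum

-- the next five lemmas are cited by the ports' decreasing_by, so they stay above the ports
lemma pvCharVal_digitChar (m : Nat) (h : m < 10) : pvCharVal (Nat.digitChar m) = (m : Int) := by
  interval_cases m <;> decide

lemma pvToDigitsCore_sum : ∀ (f n : Nat) (acc : List Char), n < f →
    ((Nat.toDigitsCore 10 f n acc).map pvCharVal).sum
      = ((Nat.digits 10 n).sum : Int) + (acc.map pvCharVal).sum := by
  intro f
  induction f with
  | zero => intro n acc h; exact absurd h (Nat.not_lt_zero n)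
  | succ f ih =>
    intro n acc h
    simp only [Nat.toDigitsCore]
    by_cases h0 : n / 10 = 0
    · rw [if_pos h0]
      have hv := pvCharVal_digitChar (n % 10) (by omega)
      rcases Nat.eq_zero_or_pos n with rfl | hn
      · simp [hv]
      · rw [Nat.digits_of_lt 10 n (by omega) (by omega)]
        have hmn : n % 10 = n := Nat.mod_eq_of_lt (by omega)
        simp [hmn]
        rw [hmn] at hv
        exact hv
    · rw [if_neg h0]
      have h10 : 10 ≤ n := by
        rcases Nat.lt_or_ge n 10 with hlt | hge
        · exact absurd (Nat.div_eq_of_lt hlt) h0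
        · exact hge
      have hrec : n / 10 < f := by omega
      rw [ih (n / 10) (Nat.digitChar (n % 10) :: acc) hrec]
      rw [Nat.digits_def' (by norm_num : 1 < 10) (by omega : 0 < n)]
      have hv := pvCharVal_digitChar (n % 10) (by omega)
      simp [hv]
      ring

lemma pvDigitSum_eq (n : Int) (h : 0 ≤ n) :
    pvDigitSum n = ((Nat.digits 10 n.toNat).sum : Int) := by
  unfold pvDigitSum PySem.Int.toChars
  rw [if_neg (by omega)]
  have := pvToDigitsCore_sum (n.toNat + 1) n.toNat [] (by omega)
  simpa [Nat.toDigits] using this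

lemma pvDigitsSum_lt (n : Nat) (h : 10 ≤ n) : (Nat.digits 10 n).sum < n := by
  rw [Nat.digits_def' (by norm_num : 1 < 10) (by omega : 0 < n)]
  have := Nat.digit_sum_le 10 (n / 10)
  simp only [List.sum_cons]
  omega

lemma pvDigitSum_toNat_lt (n : Int) (h : 9 < n) : (pvDigitSum n).toNat < n.toNat := by
  rw [pvDigitSum_eq n (by omega)]
  have h1 := pvDigitsSum_lt n.toNat (by omega)
  omega

-- port of the inline  while ciclo_num > 9: ciclo_num = sum(int(d) for d in str(ciclo_num))
def pvWhile9 (n : Int) : Int :=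
  if h : 9 < n then pvWhile9 (pvDigitSum n) else n
termination_by n.toNat
decreasing_by exact pvDigitSum_toNat_lt n h

def reduce_number (n : Int) : Int :=
  if h : 9 < n ∧ n ≠ 11 ∧ n ≠ 22 ∧ n ≠ 33 then reduce_number (pvDigitSum n) else n
termination_by n.toNat
decreasing_by exact pvDigitSum_toNat_lt n h.1

def calcular_ciclos_vida (dia : Int) (mes : Int) (ano : Int) (destino : Int) :
    List (String × List (String × Option Int)) :=
  let ciclo1_num := pvWhile9 mes
  let ciclo1_ano_inicio := ano
  let ciclo1_periodo_anos := 37 - destino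
  let ciclo1_ano_fim := ciclo1_ano_inicio + ciclo1_periodo_anos
  let ciclo2_num := pvWhile9 dia
  let ciclo2_ano_inicio := ciclo1_ano_fim
  let ciclo2_ano_fim := ciclo2_ano_inicio + 27
  let ano_reduzido := reduce_number ano
  let ciclo3_num := if ano_reduzido = 11 ∨ ano_reduzido = 22 then ano_reduzido else ano_reduzido
  let ciclo3_ano_inicio := ciclo2_ano_fim
  [("ciclo1", [("numero", some ciclo1_num), ("inicio", some ciclo1_ano_inicio), ("fim", some ciclo1_ano_fim)]),
   ("ciclo2", [("numero", some ciclo2_num), ("inicio", some ciclo2_ano_inicio), ("fim", some ciclo2_ano_fim)]),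
   ("ciclo3", [("numero", some ciclo3_num), ("inicio", some ciclo3_ano_inicio), ("fim", none)])]

-- ===== PORT B =====
def raiz_digital (n : Int) : Int := if n ≤ 9 then n else 1 + PySem.Int.mod (n - 1) 9

-- Source B's reduzir; its digit-sum expression is the same sum(int(d) for d in str(n)), so it shares pvDigitSum
def reduzir (n : Int) : Int :=
  if h : n ≤ 9 ∨ n = 11 ∨ n = 22 ∨ n = 33 then n else reduzir (pvDigitSum n)
termination_by n.toNat
decreasing_by exact pvDigitSum_toNat_lt n (by omega)

def calcular_ciclos_vida_alt (dia : Int) (mes : Int) (ano : Int) (destino : Int) :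
    List (String × List (String × Option Int)) :=
  let ciclo1_fim := ano + 37 - destino
  let ciclo2_fim := ciclo1_fim + 27
  [("ciclo1", [("numero", some (raiz_digital mes)), ("inicio", some ano), ("fim", some ciclo1_fim)]),
   ("ciclo2", [("numero", some (raiz_digital dia)), ("inicio", some ciclo1_fim), ("fim", some ciclo2_fim)]),
   ("ciclo3", [("numero", some (reduzir ano)), ("inicio", some ciclo2_fim), ("fim", none)])]

-- ===== PRECONDITION & SPEC =====
def Spec_calcular_ciclos_vida (dia : Int) (mes : Int) (ano : Int) (destino : Int) (out : List (String × List (String × Option Int))) : Prop := out = calcular_ciclos_vida_alt dia mes ano destino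
instance (dia : Int) (mes : Int) (ano : Int) (destino : Int) (out : List (String × List (String × Option Int))) : Decidable (Spec_calcular_ciclos_vida dia mes ano destino out) := by unfold Spec_calcular_ciclos_vida; infer_instance

-- ===== CLAIM (what is proved, stated in full; the proofs are below) =====
def Claim_equal_calcular_ciclos_vida : Prop := ∀ (dia : Int) (mes : Int) (ano : Int) (destino : Int), Dom_calcular_ciclos_vida dia mes ano destino → Spec_calcular_ciclos_vida dia mes ano destino (calcular_ciclos_vida dia mes ano destino)

-- ===== LEMMAS AND PROOFS =====
lemma pvDigitsSum_pos : ∀ n : Nat, 0 < n → 0 < (Nat.digits 10 n).sum := by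
  intro n
  induction n using Nat.strong_induction_on with
  | _ n ih =>
    intro h
    rw [Nat.digits_def' (by norm_num : 1 < 10) h]
    simp only [List.sum_cons]
    rcases Nat.eq_zero_or_pos (n % 10) with h0 | h1
    · have hd : 0 < n / 10 := by omega
      have := ih (n / 10) (by omega) hd
      omega
    · omega

lemma pvWhile9_eq_raiz (n : Int) : pvWhile9 n = raiz_digital n := by
  by_cases h9 : 9 < n
  · rw [pvWhile9, dif_pos h9, pvWhile9_eq_raiz (pvDigitSum n)]
    -- raiz_digital (pvDigitSum n) = raiz_digital n : digital-root invariance under digit sum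
    have hsum : pvDigitSum n = ((Nat.digits 10 n.toNat).sum : Int) := pvDigitSum_eq n (by omega)
    have hmod : n.toNat % 9 = (Nat.digits 10 n.toNat).sum % 9 :=
      Nat.modEq_digits_sum 9 10 (by norm_num) n.toNat
    have hpos : 0 < (Nat.digits 10 n.toNat).sum := pvDigitsSum_pos n.toNat (by omega)
    simp only [raiz_digital, hsum,
      PySem.Int.mod_eq_emod_of_pos (b := 9) (by norm_num)]
    split_ifs <;> omega
  · rw [pvWhile9, dif_neg h9, raiz_digital, if_pos (by omega)]
termination_by n.toNat
decreasing_by exact pvDigitSum_toNat_lt n h9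

lemma pvReduce_eq (n : Int) : reduce_number n = reduzir n := by
  by_cases h : 9 < n ∧ n ≠ 11 ∧ n ≠ 22 ∧ n ≠ 33
  · rw [reduce_number, dif_pos h, reduzir, dif_neg (by omega), pvReduce_eq (pvDigitSum n)]
  · rw [reduce_number, dif_neg h, reduzir, dif_pos (by omega)]
termination_by n.toNat
decreasing_by exact pvDigitSum_toNat_lt n h.1

-- ===== VERDICT (by name: the statement is the Claim_ definition above) =====
theorem calcular_ciclos_vida_spec : Claim_equal_calcular_ciclos_vida := by
  intro dia mes ano destino _
  unfold Spec_calcular_ciclos_vida calcular_ciclos_vida calcular_ciclos_vida_alt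
  simp only [pvWhile9_eq_raiz, pvReduce_eq, ite_self]
  have h1 : ano + (37 - destino) = ano + 37 - destino := by ring
  rw [h1]
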